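-- pv_equiv track=rewrite | github.com/LarisaOvchinnikova/python_codewars | Word a10n (abbreviation).py | abbreviate
-- ===== SOURCE A (Python) =====
-- def change(s):
--     if len(s) <= 3: return s
--     return s[0] + str(len(s)-2) + s[-1]
--
-- def abbreviate(s):
--     seps = [el for el in s if not el.isalpha()]
--     s1 = "".join([el if el not in seps else "*" for el in s ])
--     s2 = [change(el) for el in s1.split("*")]
--     res = ''
--     for i in range(len(seps)):
--         res += s2[i] + seps[i]
--     res+=s2[-1]
--     return res
-- ===== SOURCE B (Python) =====
-- def abbreviate(s):
--     # single linear pass: accumulate the current letter run, flush on every separator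
--     out = []
--     word = ""
--     for c in s:
--         if c.isalpha():
--             word += c
--         else:
--             out.append(word if len(word) <= 3 else word[0] + str(len(word) - 2) + word[-1])
--             out.append(c)
--             word = ""
--     out.append(word if len(word) <= 3 else word[0] + str(len(word) - 2) + word[-1])
--     return "".join(out)
-- ===== Notes on version B (the rewrite author's own statement) =====
-- stated objective: simpler
-- what changed: A builds a separator list, masks non-letter characters to a sentinel, splits on it, and re-interleaves the abbreviated segments with the separators by integer indexing; B is one linear pass that accumulates the current letter run and flushes its abbreviation at each separator.
import Mathlib
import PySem

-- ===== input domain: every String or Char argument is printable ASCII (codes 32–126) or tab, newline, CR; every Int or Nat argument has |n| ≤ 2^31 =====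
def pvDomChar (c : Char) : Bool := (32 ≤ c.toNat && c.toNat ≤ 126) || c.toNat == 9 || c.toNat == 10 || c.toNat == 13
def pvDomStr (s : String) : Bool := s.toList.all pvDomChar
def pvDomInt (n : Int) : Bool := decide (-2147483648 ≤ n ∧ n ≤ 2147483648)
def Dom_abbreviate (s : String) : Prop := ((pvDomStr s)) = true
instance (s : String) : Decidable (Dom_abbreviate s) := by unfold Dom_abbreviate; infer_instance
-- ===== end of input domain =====

-- B replaces A's split-mask-join-reindex pipeline (filter the separators, mask them to '*',
-- split, then re-interleave by integer indexing) by one linear left-to-right pass that keeps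
-- the current letter run and flushes it at each separator; objective: simpler.

-- ===== PORT A =====
-- helper `change` of A; the pyGetD defaults are never used: s[0]/s[-1] are read only when len(s) > 3
def changeA (s : List Char) : List Char :=
  if s.length ≤ 3 then s
  else (PySem.List.pyGetD s 0 ' ' :: PySem.Int.toChars ((s.length : Int) - 2)) ++
    [PySem.List.pyGetD s (-1) ' ']

def abbreviate (s : String) : String :=
  let cs := s.toList
  let seps := cs.filter (fun el => !(PySem.Chars.isalpha el))
  let s1 := cs.map (fun el => if el ∉ seps then el else '*')
  let s2 := (PySem.Chars.splitOn s1 ['*']).map changeA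
  -- the loop indices are always in range (len s2 = len seps + 1), so the pyGetD defaults are exact
  let res := (PySem.List.pyRange 0 (seps.length : Int) 1).foldl
      (fun r i => r ++ PySem.List.pyGetD s2 i [] ++ [PySem.List.pyGetD seps i ' ']) []
  String.mk (res ++ PySem.List.pyGetD s2 (-1) [])

-- ===== PORT B =====
-- B's inline abbreviation expression `word if len(word) <= 3 else word[0]+str(len(word)-2)+word[-1]`
def abbrB (w : List Char) : List Char :=
  if w.length ≤ 3 then w
  else (PySem.List.pyGetD w 0 ' ' :: PySem.Int.toChars ((w.length : Int) - 2)) ++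
    [PySem.List.pyGetD w (-1) ' ']

def abbreviate_alt (s : String) : String :=
  let r := s.toList.foldl
    (fun (acc : List Char × List Char) c =>
      if PySem.Chars.isalpha c then (acc.1, acc.2 ++ [c])
      else (acc.1 ++ abbrB acc.2 ++ [c], []))
    ([], [])
  String.mk (r.1 ++ abbrB r.2)

-- ===== PRECONDITION & SPEC =====
def Spec_abbreviate (s : String) (out : String) : Prop := out = abbreviate_alt s
instance (s : String) (out : String) : Decidable (Spec_abbreviate s out) := by unfold Spec_abbreviate; infer_instance

-- ===== CLAIM (what is proved, stated in full; the proofs are below) =====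
def Claim_equal_abbreviate : Prop := ∀ (s : String), Dom_abbreviate s → Spec_abbreviate s (abbreviate s)

-- ===== LEMMAS AND PROOFS =====

-- mask a character: letters stay, anything else becomes '*' (what A's s1 computes)
def maskF (c : Char) : Char := if PySem.Chars.isalpha c then c else '*'

-- prepend w to the first segment
def consFirst (w : List Char) : List (List Char) → List (List Char)
  | [] => [w]
  | h :: t => (w ++ h) :: t

-- structural form of "".join(l).split("*")
def splitStar : List Char → List (List Char)
  | [] => [[]]
  | c :: l => if c = '*' then [] :: splitStar l else consFirst [c] (splitStar l)

-- the common recursive specification both programs compute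
def specAbbr : List Char → List Char → List Char
  | [], w => abbrB w
  | c :: cs, w =>
      if PySem.Chars.isalpha c then specAbbr cs (w ++ [c])
      else abbrB w ++ c :: specAbbr cs []

theorem changeA_eq_abbrB : changeA = abbrB := rfl

theorem splitStar_ne_nil (l : List Char) : splitStar l ≠ [] := by
  cases l with
  | nil => simp [splitStar]
  | cons c t =>
    simp only [splitStar]
    split
    · simp
    · cases h : splitStar t <;> simp [consFirst]

theorem consFirst_nil {S : List (List Char)} (h : S ≠ []) : consFirst [] S = S := by
  cases S with
  | nil => exact absurd rfl h
  | cons a t => simp [consFirst]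

theorem consFirst_consFirst (a b : List Char) (S : List (List Char)) :
    consFirst a (consFirst b S) = consFirst (a ++ b) S := by
  cases S <;> simp [consFirst]

theorem length_consFirst (w : List Char) {S : List (List Char)} (h : S ≠ []) :
    (consFirst w S).length = S.length := by
  cases S with
  | nil => exact absurd rfl h
  | cons a t => simp [consFirst]

theorem go_spec (fuel : Nat) (l cur : List Char) (acc : List (List Char))
    (h : l.length < fuel) :
    PySem.Chars.splitOn.go ['*'] fuel l cur acc =
      acc.reverse ++ consFirst cur.reverse (splitStar l) := by
  induction fuel generalizing l cur acc with
  | zero => omega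
  | succ f ih =>
    cases l with
    | nil => simp [PySem.Chars.splitOn.go, splitStar, consFirst]
    | cons c rest =>
      by_cases hc : c = '*'
      · subst hc
        have hpre : List.isPrefixOf ['*'] ('*' :: rest) = true := by
          simp [List.isPrefixOf]
        simp only [PySem.Chars.splitOn.go, splitStar, hpre, if_true,
          List.length_nil, List.length_cons, List.drop_succ_cons, List.drop]
        rw [ih rest [] (cur.reverse :: acc) (by simp at h; omega)]
        cases hS : splitStar rest with
        | nil => exact absurd hS (splitStar_ne_nil rest)
        | cons a t => simp [consFirst]
      · have hpre : List.isPrefixOf ['*'] (c :: rest) = false := by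
          simp only [List.isPrefixOf, Bool.and_eq_false_iff, beq_eq_false_iff_ne, ne_eq]
          exact Or.inl fun he => hc he.symm
        simp only [PySem.Chars.splitOn.go, splitStar, hpre, Bool.false_eq_true, if_false,
          if_neg hc]
        rw [ih rest (c :: cur) acc (by simp at h; omega)]
        rw [consFirst_consFirst]
        simp

theorem splitOn_eq_splitStar (l : List Char) :
    PySem.Chars.splitOn l ['*'] = splitStar l := by
  unfold PySem.Chars.splitOn
  rw [go_spec (l.length + 1) l [] [] (Nat.lt_succ_self _)]
  simpa using consFirst_nil (splitStar_ne_nil l)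

theorem mask_eq (cs : List Char) :
    cs.map (fun el => if el ∉ cs.filter (fun e => !(PySem.Chars.isalpha e)) then el else '*') =
      cs.map maskF := by
  apply List.map_congr_left
  intro c hc
  by_cases h : PySem.Chars.isalpha c
  · have : c ∉ cs.filter (fun e => !(PySem.Chars.isalpha e)) := by
      simp [List.mem_filter, h]
    simp [this, maskF, h]
  · have : c ∈ cs.filter (fun e => !(PySem.Chars.isalpha e)) := by
      simp [List.mem_filter, hc, h]
    simp [this, maskF, h]

theorem star_not_alpha : PySem.Chars.isalpha '*' = false := by decide

theorem maskF_alpha {c : Char} (h : PySem.Chars.isalpha c = true) : maskF c = c := by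
  simp [maskF, h]

theorem maskF_not {c : Char} (h : ¬ PySem.Chars.isalpha c = true) : maskF c = '*' := by
  simp [maskF, h]

theorem alpha_ne_star {c : Char} (h : PySem.Chars.isalpha c = true) : c ≠ '*' := by
  intro he; rw [he] at h; simp [star_not_alpha] at h

theorem splitStar_cons_alpha {c : Char} (h : PySem.Chars.isalpha c = true) (l : List Char) :
    splitStar (c :: l) = consFirst [c] (splitStar l) := by
  simp [splitStar, alpha_ne_star h]

theorem splitStar_cons_star (l : List Char) : splitStar ('*' :: l) = [] :: splitStar l := by
  simp [splitStar]

theorem length_splitStar_mask (cs : List Char) :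
    (splitStar (cs.map maskF)).length =
      (cs.filter (fun e => !(PySem.Chars.isalpha e))).length + 1 := by
  induction cs with
  | nil => simp [splitStar]
  | cons c t ih =>
    by_cases h : PySem.Chars.isalpha c
    · rw [List.map_cons, maskF_alpha h, splitStar_cons_alpha h,
        length_consFirst _ (splitStar_ne_nil _), ih]
      simp [h]
    · rw [List.map_cons, maskF_not h, splitStar_cons_star]
      simp [h, ih]

-- A's interleaving of abbreviated segments and separators, in zip/flatMap form
def interA (segs : List (List Char)) (seps : List Char) : List Char :=
  ((segs.map changeA).zip seps).flatMap (fun p => p.1 ++ [p.2]) ++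
    PySem.List.pyGetD (segs.map changeA) (-1) []

theorem pyGetD_neg_one_singleton (x : List Char) :
    PySem.List.pyGetD [x] (-1) ([] : List Char) = x := by
  have := PySem.List.pyGetD_neg_natCast [x] 1 ([] : List Char) (by omega) (by simp)
  simpa using this

theorem pyGetD_neg_one_cons (x : List Char) {T : List (List Char)} (h : T ≠ []) :
    PySem.List.pyGetD (x :: T) (-1) ([] : List Char) =
      PySem.List.pyGetD T (-1) ([] : List Char) := by
  have h1 : 0 < T.length := List.length_pos_of_ne_nil h
  have e1 := PySem.List.pyGetD_neg_natCast (x :: T) 1 ([] : List Char) (by omega) (by simp)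
  have e2 := PySem.List.pyGetD_neg_natCast T 1 ([] : List Char) (by omega) (by omega)
  rw [show ((-1 : Int)) = -((1 : Nat) : Int) by norm_num] at *
  rw [e1, e2]
  have : (x :: T).length - 1 = (T.length - 1) + 1 := by simp; omega
  simp only [this]
  simp

theorem mainA (cs : List Char) (w : List Char) :
    interA (consFirst w (splitStar (cs.map maskF)))
        (cs.filter (fun e => !(PySem.Chars.isalpha e))) = specAbbr cs w := by
  induction cs generalizing w with
  | nil =>
    simp [interA, splitStar, consFirst, specAbbr, pyGetD_neg_one_singleton,
      changeA_eq_abbrB]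
  | cons c t ih =>
    by_cases h : PySem.Chars.isalpha c
    · rw [List.map_cons, maskF_alpha h, splitStar_cons_alpha h, consFirst_consFirst]
      rw [show (c :: t).filter (fun e => !(PySem.Chars.isalpha e)) =
            t.filter (fun e => !(PySem.Chars.isalpha e)) by simp [h]]
      rw [show specAbbr (c :: t) w = specAbbr t (w ++ [c]) by simp [specAbbr, h]]
      exact ih (w ++ [c])
    · have hS := splitStar_ne_nil (t.map maskF)
      rw [List.map_cons, maskF_not h, splitStar_cons_star]
      rw [show consFirst w ([] :: splitStar (t.map maskF)) =
            w :: splitStar (t.map maskF) by simp [consFirst]]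
      rw [show (c :: t).filter (fun e => !(PySem.Chars.isalpha e)) =
            c :: t.filter (fun e => !(PySem.Chars.isalpha e)) by simp [h]]
      have hT : (splitStar (t.map maskF)).map changeA ≠ [] := by simpa using hS
      simp only [interA, List.map_cons, List.zip_cons_cons, List.flatMap_cons]
      rw [pyGetD_neg_one_cons _ hT]
      have hih := ih []
      rw [consFirst_nil hS] at hih
      simp only [interA] at hih
      rw [show specAbbr (c :: t) w = abbrB w ++ c :: specAbbr t [] by simp [specAbbr, h]]
      rw [← hih, changeA_eq_abbrB]
      simp [List.append_assoc]

theorem mainB (cs : List Char) (res w : List Char) :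
    (cs.foldl
      (fun (acc : List Char × List Char) c =>
        if PySem.Chars.isalpha c then (acc.1, acc.2 ++ [c])
        else (acc.1 ++ abbrB acc.2 ++ [c], []))
      (res, w)).1 ++
      abbrB (cs.foldl
        (fun (acc : List Char × List Char) c =>
          if PySem.Chars.isalpha c then (acc.1, acc.2 ++ [c])
          else (acc.1 ++ abbrB acc.2 ++ [c], []))
        (res, w)).2 = res ++ specAbbr cs w := by
  induction cs generalizing res w with
  | nil => simp [specAbbr]
  | cons c t ih =>
    by_cases h : PySem.Chars.isalpha c
    · simp only [List.foldl_cons, if_pos h, specAbbr]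
      rw [ih]
    · simp only [List.foldl_cons, if_neg h, specAbbr]
      rw [ih]
      simp [List.append_assoc]

theorem abbreviate_eq_spec (s : String) :
    abbreviate s = String.mk (specAbbr s.toList []) := by
  unfold abbreviate
  simp only []
  set cs := s.toList with hcs
  set seps := cs.filter (fun e => !(PySem.Chars.isalpha e)) with hseps
  rw [mask_eq cs]
  rw [splitOn_eq_splitStar]
  set S := splitStar (cs.map maskF) with hSdef
  have hlen : S.length = seps.length + 1 := length_splitStar_mask cs
  set s2 := S.map changeA with hs2
  have hs2len : s2.length = seps.length + 1 := by simp [hs2, hlen]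
  -- turn the index loop into a structural fold over the zipped lists
  have hzlen : (s2.zip seps).length = seps.length := by
    simp [List.length_zip, hs2len]
  have hcongr :
      (PySem.List.pyRange 0 (seps.length : Int) 1).foldl
        (fun r i => r ++ PySem.List.pyGetD s2 i [] ++ [PySem.List.pyGetD seps i ' ']) [] =
      (PySem.List.pyRange 0 (seps.length : Int) 1).foldl
        (fun r i => r ++ (PySem.List.pyGetD (s2.zip seps) i ([], ' ')).1 ++
          [(PySem.List.pyGetD (s2.zip seps) i ([], ' ')).2]) [] := by
    apply PySem.List.foldl_congr_mem
    intro acc i hi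
    rw [PySem.List.mem_pyRange_one] at hi
    have h0 : 0 ≤ i := hi.1
    have h1 : i < (seps.length : Int) := hi.2
    rw [PySem.List.pyGetD_eq_getElem s2 [] h0 (by omega),
        PySem.List.pyGetD_eq_getElem seps ' ' h0 (by exact_mod_cast h1),
        PySem.List.pyGetD_eq_getElem (s2.zip seps) ([], ' ') h0 (by rw [hzlen]; exact_mod_cast h1)]
    simp [List.getElem_zip]
  rw [hcongr]
  rw [show (seps.length : Int) = ((s2.zip seps).length : Int) by rw [hzlen]]
  rw [show (PySem.List.pyRange 0 ((s2.zip seps).length : Int) 1) =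
        (PySem.List.pyRange 0 ((s2.zip seps).length : Int)) from rfl]
  rw [PySem.List.foldl_pyRange_zero_pyGetD' (s2.zip seps) ([], ' ')
    (fun r p => r ++ p.1 ++ [p.2]) []]
  simp only [List.append_assoc]
  rw [PySem.List.foldl_append_eq_flatMap (fun p : List Char × Char => p.1 ++ [p.2])]
  have : ([] : List Char) ++ (s2.zip seps).flatMap (fun p => p.1 ++ [p.2]) ++
      PySem.List.pyGetD s2 (-1) [] = interA S seps := by
    simp [interA, hs2]
  rw [this]
  have hA := mainA cs []
  rw [consFirst_nil (splitStar_ne_nil _)] at hA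
  rw [← hseps, ← hSdef] at hA
  rw [hA]

theorem abbreviate_alt_eq_spec (s : String) :
    abbreviate_alt s = String.mk (specAbbr s.toList []) := by
  unfold abbreviate_alt
  simp only []
  rw [show (([], []) : List Char × List Char) = (([] : List Char), ([] : List Char)) from rfl]
  have := mainB s.toList [] []
  simp only [List.nil_append] at this
  exact congrArg String.mk this

-- ===== VERDICT (by name: the statement is the Claim_ definition above) =====
theorem abbreviate_spec : Claim_equal_abbreviate := by
  intro s _
  unfold Spec_abbreviate
  rw [abbreviate_eq_spec, abbreviate_alt_eq_spec]
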